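-- pv_equiv track=rewrite | github.com/chungoid/chungoid | src/chungoid/protocols/universal/tool_use.py | _group_tools_by_phase
-- ===== SOURCE A (Python) =====
-- from typing import Any, Dict, List, Optional, Set, Tuple
--
-- def _group_tools_by_phase(tools: List[str]) -> Dict[str, List[str]]:
--     """Group tools by execution phase."""
--     phases = {
--         "preparation": [],
--         "execution": [],
--         "validation": []
--     }
--
--     for tool in tools:
--         if "validate" in tool or "check" in tool:
--             phases["validation"].append(tool)
--         elif "prepare" in tool or "setup" in tool:
--             phases["preparation"].append(tool)
--         else:
--             phases["execution"].append(tool)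
--
--     return phases
-- ===== SOURCE B (Python) =====
-- from typing import Dict, List
--
-- def _group_tools_by_phase(tools: List[str]) -> Dict[str, List[str]]:
--     """Group tools by execution phase (three independent passes, priority: validation > preparation > execution)."""
--     is_validation = lambda t: "validate" in t or "check" in t
--     is_preparation = lambda t: not is_validation(t) and ("prepare" in t or "setup" in t)
--     return {
--         "preparation": [t for t in tools if is_preparation(t)],
--         "execution": [t for t in tools if not is_validation(t) and not is_preparation(t)],
--         "validation": [t for t in tools if is_validation(t)],
--     }
-- ===== Notes on version B (the rewrite author's own statement) =====
-- stated objective: simpler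
-- what changed: Replaces the stateful dispatch loop that appends into a mutable dict with three independent filtering passes over the input, one per phase, assembled directly into the result dict.
import Mathlib
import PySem

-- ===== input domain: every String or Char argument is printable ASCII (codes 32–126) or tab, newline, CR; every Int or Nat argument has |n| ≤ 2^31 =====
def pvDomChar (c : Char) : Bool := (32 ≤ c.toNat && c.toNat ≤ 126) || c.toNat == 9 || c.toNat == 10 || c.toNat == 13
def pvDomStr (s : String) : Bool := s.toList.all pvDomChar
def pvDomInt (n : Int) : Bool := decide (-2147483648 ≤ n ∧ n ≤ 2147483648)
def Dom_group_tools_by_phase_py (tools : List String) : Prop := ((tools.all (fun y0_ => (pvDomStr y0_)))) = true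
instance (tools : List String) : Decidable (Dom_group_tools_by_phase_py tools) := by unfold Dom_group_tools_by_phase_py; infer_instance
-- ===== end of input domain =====

-- B replaces A's stateful dict-dispatch loop with three independent filtering passes (same O(n) cost, plainer structure).


-- ===== PORT A =====
-- literal port: a dict with the three phase keys, one dispatch loop appending into it, returned as items
def group_tools_by_phase_py (tools : List String) : List (String × List String) :=
  let phases : PySem.Dict String (List String) :=
    PySem.Dict.mk [("preparation", []), ("execution", []), ("validation", [])]
  (tools.foldl (fun phases tool =>
    if PySem.Str.isIn "validate" tool || PySem.Str.isIn "check" tool then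
      phases.modify "validation" [] (· ++ [tool])
    else if PySem.Str.isIn "prepare" tool || PySem.Str.isIn "setup" tool then
      phases.modify "preparation" [] (· ++ [tool])
    else
      phases.modify "execution" [] (· ++ [tool])) phases).items

-- ===== PORT B =====
def isVal (t : String) : Bool := PySem.Str.isIn "validate" t || PySem.Str.isIn "check" t
def isPrep (t : String) : Bool := !isVal t && (PySem.Str.isIn "prepare" t || PySem.Str.isIn "setup" t)

def group_tools_by_phase_py_alt (tools : List String) : List (String × List String) :=
  [("preparation", tools.filter isPrep),
   ("execution", tools.filter (fun t => !isVal t && !isPrep t)),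
   ("validation", tools.filter isVal)]

-- ===== PRECONDITION & SPEC =====
def Spec_group_tools_by_phase_py (tools : List String) (out : List (String × List String)) : Prop := out = group_tools_by_phase_py_alt tools
instance (tools : List String) (out : List (String × List String)) : Decidable (Spec_group_tools_by_phase_py tools out) := by unfold Spec_group_tools_by_phase_py; infer_instance

-- ===== CLAIM (what is proved, stated in full; the proofs are below) =====
def Claim_equal_group_tools_by_phase_py : Prop := ∀ (tools : List String), Dom_group_tools_by_phase_py tools → Spec_group_tools_by_phase_py tools (group_tools_by_phase_py tools)

-- ===== LEMMAS AND PROOFS =====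

-- modify at each of the three literal keys just rewrites that slot
lemma mod_val (p e v : List String) (t : String) :
    (PySem.Dict.mk [("preparation", p), ("execution", e), ("validation", v)] : PySem.Dict String (List String)).modify "validation" [] (· ++ [t])
      = PySem.Dict.mk [("preparation", p), ("execution", e), ("validation", v ++ [t])] := by
  simp [PySem.Dict.modify, PySem.Dict.contains, PySem.Dict.getD, PySem.Dict.get?, PySem.Dict.insert]

lemma mod_prep (p e v : List String) (t : String) :
    (PySem.Dict.mk [("preparation", p), ("execution", e), ("validation", v)] : PySem.Dict String (List String)).modify "preparation" [] (· ++ [t])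
      = PySem.Dict.mk [("preparation", p ++ [t]), ("execution", e), ("validation", v)] := by
  simp [PySem.Dict.modify, PySem.Dict.contains, PySem.Dict.getD, PySem.Dict.get?, PySem.Dict.insert]

lemma mod_exec (p e v : List String) (t : String) :
    (PySem.Dict.mk [("preparation", p), ("execution", e), ("validation", v)] : PySem.Dict String (List String)).modify "execution" [] (· ++ [t])
      = PySem.Dict.mk [("preparation", p), ("execution", e ++ [t]), ("validation", v)] := by
  simp [PySem.Dict.modify, PySem.Dict.contains, PySem.Dict.getD, PySem.Dict.get?, PySem.Dict.insert]

-- loop invariant of A's dispatch loop: the three phase lists accumulate exactly B's three filters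
lemma group_tools_inv (tools : List String) (p e v : List String) :
    (tools.foldl (fun phases tool =>
      if PySem.Str.isIn "validate" tool || PySem.Str.isIn "check" tool then
        phases.modify "validation" [] (· ++ [tool])
      else if PySem.Str.isIn "prepare" tool || PySem.Str.isIn "setup" tool then
        phases.modify "preparation" [] (· ++ [tool])
      else
        phases.modify "execution" [] (· ++ [tool]))
      (PySem.Dict.mk [("preparation", p), ("execution", e), ("validation", v)])).items =
    [("preparation", p ++ tools.filter isPrep),
     ("execution", e ++ tools.filter (fun t => !isVal t && !isPrep t)),
     ("validation", v ++ tools.filter isVal)] := by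
  induction tools generalizing p e v with
  | nil => simp
  | cons t ts ih =>
    simp only [List.foldl_cons, List.filter_cons]
    cases h1 : PySem.Str.isIn "validate" t <;> cases h2 : PySem.Str.isIn "check" t
    · simp at h1 h2
      rw [if_neg (by simp)]
      cases h3 : PySem.Str.isIn "prepare" t <;> cases h4 : PySem.Str.isIn "setup" t
      · simp at h3 h4
        rw [if_neg (by simp), mod_exec, ih]
        clear ih; simp_all [isPrep, isVal]
      · simp at h3 h4
        rw [if_pos (by simp), mod_prep, ih]
        clear ih; simp_all [isPrep, isVal]
      · simp at h3 h4
        rw [if_pos (by simp), mod_prep, ih]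
        clear ih; simp_all [isPrep, isVal]
      · simp at h3 h4
        rw [if_pos (by simp), mod_prep, ih]
        clear ih; simp_all [isPrep, isVal]
    all_goals
      simp at h1 h2
      rw [if_pos (by simp), mod_val, ih]
      clear ih; simp_all [isPrep, isVal]

-- ===== VERDICT (by name: the statement is the Claim_ definition above) =====
theorem group_tools_by_phase_py_spec : Claim_equal_group_tools_by_phase_py := by
  intro tools _
  show group_tools_by_phase_py tools = group_tools_by_phase_py_alt tools
  simpa [group_tools_by_phase_py, group_tools_by_phase_py_alt] using group_tools_inv tools [] [] []
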